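-- pv_equiv track=rewrite | github.com/Maizono-san/Code-PTIT-Python | PY01041 - So tang giam.py | check
-- ===== SOURCE A (Python) =====
-- def check(s):
--     if len(s) < 3:
--         return False
--     b = -1
--     for i in range(len(s) - 2):
--         if s[i] >= s[i + 1]:
--             b = i
--             break
--     if b == 0:
--         return False
--     else:
--         for j in range(b,len(s) - 1):
--             if s[j] <= s[j + 1]:
--                 return False
--         return True
-- ===== SOURCE B (Python) =====
-- def check(s):
--     n = len(s)
--     if n < 3:
--         return False
--     p = s.index(max(s))
--     if p == 0 or p == n - 1:
--         return False
--     return all(s[i] < s[i + 1] for i in range(p)) and \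
--            all(s[j] > s[j + 1] for j in range(p, n - 1))
-- ===== Notes on version B (the rewrite author's own statement) =====
-- stated objective: simpler
-- what changed: B locates the peak directly as the index of the maximum and then checks a strict ascent before it and a strict descent after it, instead of A's scan for the first non-ascent (with a fall-through into the second loop from b=-1) followed by a tail scan.
-- intended difference: On sequences of length >= 3 that are strictly increasing up to index n-2 and then drop once at the end (peak at n-2), A returns False because its first loop only scans range(n-2) and misses the final descent, while B returns True, which is the intended answer for an increase-then-decrease check. — e.g. on check([1, 2, 1]): A returns false, B returns true
import Mathlib
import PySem

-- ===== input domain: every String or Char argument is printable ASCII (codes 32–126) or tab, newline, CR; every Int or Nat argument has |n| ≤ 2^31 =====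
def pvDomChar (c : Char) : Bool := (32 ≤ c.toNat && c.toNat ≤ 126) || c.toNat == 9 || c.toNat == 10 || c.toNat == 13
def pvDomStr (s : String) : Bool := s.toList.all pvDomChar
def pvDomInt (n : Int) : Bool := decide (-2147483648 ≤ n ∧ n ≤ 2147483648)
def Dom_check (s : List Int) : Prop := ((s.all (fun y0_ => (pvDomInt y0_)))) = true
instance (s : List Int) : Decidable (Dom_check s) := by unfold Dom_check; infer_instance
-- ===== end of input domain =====

-- B checks "strict ascent to the index of the maximum, strict descent after it" instead of
-- A's first-non-ascent scan; simpler decomposition, same cost.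

-- ===== PORT A =====
-- first loop of A: returns the first i in the list of indices with s[i] >= s[i+1], else -1
def checkFindB (s : List Int) : List Int → Int
  | [] => -1
  | i :: rest =>
    if PySem.List.pyGetD s (i + 1) 0 ≤ PySem.List.pyGetD s i 0 then i
    else checkFindB s rest

-- second loop of A: returns False on the first j with s[j] <= s[j+1], else True
def checkLoop2 (s : List Int) : List Int → Bool
  | [] => true
  | j :: rest =>
    if PySem.List.pyGetD s j 0 ≤ PySem.List.pyGetD s (j + 1) 0 then false
    else checkLoop2 s rest

def check (s : List Int) : Bool :=
  if s.length < 3 then false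
  else
    let b := checkFindB s (PySem.List.pyRange 0 ((s.length : Int) - 2) 1)
    if b = 0 then false
    else checkLoop2 s (PySem.List.pyRange b ((s.length : Int) - 1) 1)

-- ===== PORT B =====
-- max(s) and s.index(...) never fail under the n >= 3 guard; the .getD 0 defaults are never taken
def check_alt (s : List Int) : Bool :=
  if s.length < 3 then false
  else
    let m := (PySem.List.max? s (fun x => x)).getD 0
    let p : Int := ((PySem.List.index? s m).getD 0 : Nat)
    if p = 0 ∨ p = (s.length : Int) - 1 then false
    else
      (PySem.List.pyRange 0 p 1).all
          (fun i => decide (PySem.List.pyGetD s i 0 < PySem.List.pyGetD s (i + 1) 0)) &&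
      (PySem.List.pyRange p ((s.length : Int) - 1) 1).all
          (fun j => decide (PySem.List.pyGetD s (j + 1) 0 < PySem.List.pyGetD s j 0))

-- ===== PRECONDITION & SPEC =====
-- On length ≥ 3 inputs strictly increasing up to index n-2 and then dropping once at the end
-- (peak at n-2), A returns False (its first loop scans only range(n-2) and misses the final
-- descent) while B returns True, the intended answer for an increase-then-decrease check.
def D_check (s : List Int) : Prop :=
  3 ≤ s.length ∧ (∀ i < s.length - 2, s.getD i 0 < s.getD (i + 1) 0) ∧
    s.getD (s.length - 1) 0 < s.getD (s.length - 2) 0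
instance (s : List Int) : Decidable (D_check s) := by unfold D_check; infer_instance

def Spec_check (s : List Int) (out : Bool) : Prop := ¬ D_check s → out = check_alt s
instance (s : List Int) (out : Bool) : Decidable (Spec_check s out) := by unfold Spec_check; infer_instance

def pvDiffWitness_check : List Int := [1, 2, 1]
def pvDiffWitnessOut_check : Bool × Bool := (false, true)

-- ===== CLAIM (what is proved, stated in full; the proofs are below) =====
def Claim_unchanged_check : Prop := ∀ (s : List Int), Dom_check s → Spec_check s (check s)
def Claim_changed_check : Prop := Dom_check (pvDiffWitness_check) ∧ D_check (pvDiffWitness_check) ∧ check (pvDiffWitness_check) = pvDiffWitnessOut_check.1 ∧ check_alt (pvDiffWitness_check) = pvDiffWitnessOut_check.2 ∧ pvDiffWitnessOut_check.1 ≠ pvDiffWitnessOut_check.2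
def Claim_exact_check : Prop := ∀ (s : List Int), Dom_check s → D_check s → check s ≠ check_alt s

-- ===== LEMMAS AND PROOFS =====

-- strict ascent on the prefix up to index p / strict descent from index p on
def IncTo (s : List Int) (p : Nat) : Prop := ∀ i < p, s.getD i 0 < s.getD (i + 1) 0
def DecFrom (s : List Int) (p : Nat) : Prop :=
  ∀ j, p ≤ j → j + 1 < s.length → s.getD (j + 1) 0 < s.getD j 0

theorem findB_char (s : List Int) (a e : Int) :
    (checkFindB s (PySem.List.pyRange a e 1) = -1 ∧
      ∀ i, a ≤ i → i < e →
        PySem.List.pyGetD s i 0 < PySem.List.pyGetD s (i + 1) 0) ∨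
    (∃ r : Int, checkFindB s (PySem.List.pyRange a e 1) = r ∧ a ≤ r ∧ r < e ∧
      PySem.List.pyGetD s (r + 1) 0 ≤ PySem.List.pyGetD s r 0 ∧
      ∀ i, a ≤ i → i < r →
        PySem.List.pyGetD s i 0 < PySem.List.pyGetD s (i + 1) 0) := by
  by_cases h : e ≤ a
  · rw [PySem.List.pyRange_one_eq_nil h]
    exact Or.inl ⟨rfl, fun i h1 h2 => absurd (lt_of_le_of_lt h1 h2) (not_lt.mpr h)⟩
  · push_neg at h
    have hlt : (e - (a + 1)).toNat < (e - a).toNat := by omega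
    rw [PySem.List.pyRange_one_cons h]
    unfold checkFindB
    split_ifs with hc
    · exact Or.inr ⟨a, rfl, le_refl _, h, hc, fun i h1 h2 => absurd (lt_of_le_of_lt h1 h2) (lt_irrefl _)⟩
    · push_neg at hc
      rcases findB_char s (a + 1) e with ⟨h1, h2⟩ | ⟨r, h1, h2, h3, h4, h5⟩
      · refine Or.inl ⟨h1, fun i hi1 hi2 => ?_⟩
        rcases eq_or_lt_of_le hi1 with rfl | hi1'
        · exact hc
        · exact h2 i (by omega) hi2
      · refine Or.inr ⟨r, h1, by omega, h3, h4, fun i hi1 hi2 => ?_⟩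
        rcases eq_or_lt_of_le hi1 with rfl | hi1'
        · exact hc
        · exact h5 i (by omega) hi2
termination_by (e - a).toNat
decreasing_by omega

theorem loop2_char (s : List Int) (a e : Int) :
    checkLoop2 s (PySem.List.pyRange a e 1) = true ↔
      ∀ j, a ≤ j → j < e →
        PySem.List.pyGetD s (j + 1) 0 < PySem.List.pyGetD s j 0 := by
  by_cases h : e ≤ a
  · rw [PySem.List.pyRange_one_eq_nil h]
    exact ⟨fun _ j h1 h2 => absurd (lt_of_le_of_lt h1 h2) (not_lt.mpr h), fun _ => rfl⟩
  · push_neg at h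
    have hlt : (e - (a + 1)).toNat < (e - a).toNat := by omega
    rw [PySem.List.pyRange_one_cons h]
    unfold checkLoop2
    split_ifs with hc
    · constructor
      · intro hfalse; exact absurd hfalse (by simp)
      · intro hall; exact absurd (hall a (le_refl _) h) (not_lt.mpr hc)
    · push_neg at hc
      rw [loop2_char s (a + 1) e]
      constructor
      · intro hall j h1 h2
        rcases eq_or_lt_of_le h1 with rfl | h1'
        · exact hc
        · exact hall j (by omega) h2
      · intro hall j h1 h2
        exact hall j (by omega) h2
termination_by (e - a).toNat
decreasing_by omega

theorem getD_int (s : List Int) (i : Int) (hi : 0 ≤ i) :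
    PySem.List.pyGetD s i 0 = s.getD i.toNat 0 := by
  obtain ⟨n, rfl⟩ := Int.eq_ofNat_of_zero_le hi
  rw [PySem.List.pyGetD_natCast, Int.toNat_natCast]

-- A's result characterised: True iff a peak p with 1 ≤ p ≤ n-3, ascent to p, descent from p
theorem charA (s : List Int) (hn : 3 ≤ s.length) :
    check s = true ↔
      ∃ p : Nat, 1 ≤ p ∧ p + 2 < s.length ∧ IncTo s p ∧ DecFrom s p := by
  unfold check
  rw [if_neg (by omega)]
  rcases findB_char s 0 ((s.length : Int) - 2) with ⟨h1, h2⟩ | ⟨r, h1, h2, h3, h4, h5⟩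
  · rw [h1, if_neg (by norm_num), loop2_char]
    constructor
    · intro hall
      have hd := hall 0 (by norm_num) (by push_cast; omega)
      have hi := h2 0 (le_refl _) (by push_cast; omega)
      omega
    · rintro ⟨p, hp1, hp2, hInc, hDec⟩
      have hd := hDec p (le_refl _) (by omega)
      have hi := h2 (p : Int) (by positivity) (by push_cast; omega)
      rw [getD_int s (p : Int) (by positivity)] at hi
      rw [getD_int s ((p : Int) + 1) (by positivity)] at hi
      simp only [show ((p : Int)).toNat = p from by omega,
        show ((p : Int) + 1).toNat = p + 1 from by omega] at hi
      omega
  · rw [h1]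
    by_cases hr0 : r = 0
    · subst hr0
      rw [if_pos rfl]
      constructor
      · intro h; exact absurd h (by simp)
      · rintro ⟨p, hp1, hp2, hInc, hDec⟩
        exfalso
        have hA : PySem.List.pyGetD s ((0:Int)+1) 0 = s.getD 1 0 := by
          rw [getD_int s ((0:Int)+1) (by norm_num)]; norm_num
        have hB : PySem.List.pyGetD s (0:Int) 0 = s.getD 0 0 := by
          rw [getD_int s 0 le_rfl]; norm_num
        rw [hA, hB] at h4
        simp only [List.getD] at h4
        have hi := hInc 0 (by omega)
        norm_num at hi
        omega
    · rw [if_neg hr0, loop2_char]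
      have hr : 0 ≤ r := h2
      constructor
      · intro hall
        refine ⟨r.toNat, by omega, by omega, ?_, ?_⟩
        · intro i hi
          have := h5 (i : Int) (by positivity) (by omega)
          rw [getD_int s (i : Int) (by positivity),
              getD_int s ((i : Int) + 1) (by positivity)] at this
          simpa [show ((i : Int)).toNat = i from by omega,
            show ((i : Int) + 1).toNat = i + 1 from by omega] using this
        · intro j hj1 hj2
          have := hall (j : Int) (by omega) (by omega)
          rw [getD_int s (j : Int) (by positivity),
              getD_int s ((j : Int) + 1) (by positivity)] at this
          simpa [show ((j : Int)).toNat = j from by omega,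
            show ((j : Int) + 1).toNat = j + 1 from by omega] using this
      · rintro ⟨p, hp1, hp2, hInc, hDec⟩
        -- first: r = p
        have hrp : r = (p : Int) := by
          rcases lt_trichotomy r (p : Int) with hlt | heq | hgt
          · exfalso
            have hi := hInc r.toNat (by omega)
            rw [← getD_int s r hr] at hi
            have : PySem.List.pyGetD s (r + 1) 0 = s.getD (r.toNat + 1) 0 := by
              rw [getD_int s (r + 1) (by omega)]
              congr 1; omega
            rw [← this] at hi
            omega
          · exact heq
          · exfalso
            have hi := h5 (p : Int) (by positivity) hgt
            have hd := hDec p (le_refl _) (by omega)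
            rw [getD_int s (p : Int) (by positivity),
                getD_int s ((p : Int) + 1) (by positivity)] at hi
            simp only [show ((p : Int)).toNat = p from by omega,
              show ((p : Int) + 1).toNat = p + 1 from by omega] at hi
            omega
        subst hrp
        intro j hj1 hj2
        have hd := hDec j.toNat (by omega) (by omega)
        rw [getD_int s j (by omega), getD_int s (j + 1) (by omega)]
        simpa [show (j + 1).toNat = j.toNat + 1 from by omega] using hd

theorem incto_lt (s : List Int) (p : Nat) (hInc : IncTo s p) :
    ∀ k < p, s.getD k 0 < s.getD p 0 := by
  induction p with
  | zero => intro k hk; omega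
  | succ q ih =>
    intro k hk
    have hq : s.getD q 0 < s.getD (q + 1) 0 := hInc q (Nat.lt_succ_self q)
    rcases Nat.lt_succ_iff_lt_or_eq.mp hk with hk' | rfl
    · exact lt_trans (ih (fun i hi => hInc i (by omega)) k hk') hq
    · exact hq

theorem decfrom_lt (s : List Int) (p : Nat) (hDec : DecFrom s p) :
    ∀ d, p + d + 1 < s.length → s.getD (p + d + 1) 0 < s.getD p 0 := by
  intro d
  induction d with
  | zero => intro h; simpa using hDec p le_rfl (by omega)
  | succ d ih =>
    intro h
    have h1 := hDec (p + d + 1) (by omega) (by omega)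
    have h2 := ih (by omega)
    have he : p + (d + 1) + 1 = (p + d + 1) + 1 := by omega
    rw [he]
    exact lt_trans h1 h2

-- the peak is the strict maximum
theorem peak_max (s : List Int) (p : Nat) (hp : p < s.length)
    (hInc : IncTo s p) (hDec : DecFrom s p) :
    ∀ k < s.length, k ≠ p → s.getD k 0 < s.getD p 0 := by
  intro k hk hne
  rcases lt_trichotomy k p with h | h | h
  · exact incto_lt s p hInc k h
  · exact absurd h hne
  · have he : k = p + (k - p - 1) + 1 := by omega
    rw [he]
    exact decfrom_lt s p hDec (k - p - 1) (by omega)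

theorem charB (s : List Int) (hn : 3 ≤ s.length) :
    check_alt s = true ↔
      ∃ p : Nat, 1 ≤ p ∧ p + 1 < s.length ∧ IncTo s p ∧ DecFrom s p := by
  have hne : s ≠ [] := by intro h; subst h; simp at hn
  obtain ⟨m0, hm⟩ : ∃ m0, PySem.List.max? s (fun x => x) = some m0 := by
    cases h : PySem.List.max? s (fun x => x) with
    | none => exact absurd ((PySem.List.max?_eq_none_iff s (fun x => x)).mp h) hne
    | some m => exact ⟨m, rfl⟩
  have hm_mem : m0 ∈ s := PySem.List.max?_mem hm
  have hmax : ∀ y ∈ s, y ≤ m0 := by simpa using PySem.List.max?_isMax hm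
  obtain ⟨k, hk⟩ : ∃ k, PySem.List.index? s m0 = some k := by
    cases h : PySem.List.index? s m0 with
    | none => exact absurd hm_mem ((PySem.List.index?_eq_none_iff s m0).mp h)
    | some k => exact ⟨k, rfl⟩
  obtain ⟨hkn, hks, hkfirst⟩ := PySem.List.getElem_of_index?_eq_some hk
  unfold check_alt
  rw [if_neg (by omega)]
  simp only [hm, hk, Option.getD_some]
  split_ifs with hif
  · constructor
    · intro h; exact absurd h (by simp)
    · rintro ⟨p, hp1, hp2, hInc, hDec⟩
      exfalso
      have hpn : p < s.length := by omega
      have hsp : s.getD p 0 ≤ m0 := by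
        refine hmax _ ?_
        rw [List.getD_eq_getElem s 0 hpn]
        exact List.getElem_mem _
      have hkp : k ≠ p := by omega
      have := peak_max s p hpn hInc hDec k hkn hkp
      rw [List.getD_eq_getElem s 0 hkn, hks] at this
      omega
  · have hk0 : k ≠ 0 := by omega
    have hk1 : k + 1 < s.length := by omega
    rw [Bool.and_eq_true, List.all_eq_true, List.all_eq_true]
    constructor
    · rintro ⟨hA, hB⟩
      refine ⟨k, by omega, by omega, ?_, ?_⟩
      · intro i hi
        have := hA (i : Int) (PySem.List.mem_pyRange_one.mpr ⟨by positivity, by omega⟩)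
        simp only [decide_eq_true_eq] at this
        rw [getD_int s (i : Int) (by positivity),
            getD_int s ((i : Int) + 1) (by positivity)] at this
        simpa [show ((i : Int)).toNat = i from by omega,
          show ((i : Int) + 1).toNat = i + 1 from by omega] using this
      · intro j hj1 hj2
        have := hB (j : Int) (PySem.List.mem_pyRange_one.mpr ⟨by omega, by omega⟩)
        simp only [decide_eq_true_eq] at this
        rw [getD_int s (j : Int) (by positivity),
            getD_int s ((j : Int) + 1) (by positivity)] at this
        simpa [show ((j : Int)).toNat = j from by omega,
          show ((j : Int) + 1).toNat = j + 1 from by omega] using this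
    · rintro ⟨p, hp1, hp2, hInc, hDec⟩
      have hpn : p < s.length := by omega
      have hmx := peak_max s p hpn hInc hDec
      have hm0 : m0 = s.getD p 0 := by
        refine le_antisymm ?_ ?_
        · obtain ⟨j, hj, hjs⟩ := List.mem_iff_getElem.mp hm_mem
          by_cases hjp : j = p
          · subst hjp
            rw [List.getD_eq_getElem s 0 hpn, hjs]
          · have := hmx j hj hjp
            rw [List.getD_eq_getElem s 0 hj, hjs] at this
            exact le_of_lt this
        · refine hmax _ ?_
          rw [List.getD_eq_getElem s 0 hpn]
          exact List.getElem_mem _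
      have hkp : k = p := by
        rcases lt_trichotomy k p with h | h | h
        · exfalso
          have := hmx k hkn (by omega)
          rw [List.getD_eq_getElem s 0 hkn, hks, hm0] at this
          omega
        · exact h
        · exfalso
          refine hkfirst p h ?_
          rw [hm0, List.getD_eq_getElem s 0 hpn]
      subst hkp
      refine ⟨?_, ?_⟩
      · intro x hx
        obtain ⟨hx1, hx2⟩ := PySem.List.mem_pyRange_one.mp hx
        simp only [decide_eq_true_eq]
        rw [getD_int s x hx1, getD_int s (x + 1) (by omega)]
        have := hInc x.toNat (by omega)
        simpa [show (x + 1).toNat = x.toNat + 1 from by omega] using this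
      · intro x hx
        obtain ⟨hx1, hx2⟩ := PySem.List.mem_pyRange_one.mp hx
        simp only [decide_eq_true_eq]
        rw [getD_int s x (by omega), getD_int s (x + 1) (by omega)]
        have := hDec x.toNat (by omega) (by omega)
        simpa [show (x + 1).toNat = x.toNat + 1 from by omega] using this

-- ===== VERDICT (by name: the statement is the Claim_ definition above) =====
theorem check_spec : Claim_unchanged_check := by
  intro s _ hD
  by_cases hn : s.length < 3
  · simp [check, check_alt, hn]
  · push_neg at hn
    have hA := charA s hn
    have hB := charB s hn
    cases hc : check s with
    | true =>
      obtain ⟨p, hp1, hp2, hInc, hDec⟩ := hA.mp hc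
      exact (hB.mpr ⟨p, hp1, by omega, hInc, hDec⟩).symm
    | false =>
      cases hc' : check_alt s with
      | false => rfl
      | true =>
        exfalso
        obtain ⟨p, hp1, hp2, hInc, hDec⟩ := hB.mp hc'
        by_cases hpI : p + 2 < s.length
        · rw [hA.mpr ⟨p, hp1, hpI, hInc, hDec⟩] at hc
          exact absurd hc (by simp)
        · have hpe : p = s.length - 2 := by omega
          refine hD ⟨hn, ?_, ?_⟩
          · intro i hi
            exact hInc i (by omega)
          · have := hDec p le_rfl (by omega)
            rw [hpe] at this
            have he : s.length - 2 + 1 = s.length - 1 := by omega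
            rw [he] at this
            exact this

theorem check_changed : Claim_changed_check := by unfold Claim_changed_check; decide

theorem check_tight : Claim_exact_check := by
  intro s _ hD
  obtain ⟨hn, hInc, hLast⟩ := hD
  have hIncP : IncTo s (s.length - 2) := hInc
  have hDecP : DecFrom s (s.length - 2) := by
    intro j hj1 hj2
    have hj : j = s.length - 2 := by omega
    subst hj
    have he : s.length - 2 + 1 = s.length - 1 := by omega
    rw [he]
    exact hLast
  have hBt : check_alt s = true :=
    (charB s hn).mpr ⟨s.length - 2, by omega, by omega, hIncP, hDecP⟩
  have hAf : check s = false := by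
    cases hc : check s with
    | false => rfl
    | true =>
      exfalso
      obtain ⟨q, hq1, hq2, hqInc, hqDec⟩ := (charA s hn).mp hc
      have h1 := hqDec q le_rfl (by omega)
      have h2 := hInc q (by omega)
      omega
  rw [hAf, hBt]
  exact (by simp : (false : Bool) ≠ true)
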